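-- pv_equiv track=rewrite | github.com/ha-china/Reachy_Mini_For_Home_Assistant | reachy_mini_home_assistant/audio/audio_player.py | _parse_pcm_format
-- ===== SOURCE A (Python) =====
-- def _parse_pcm_format(content_type: str) -> tuple[int, int]:
--     channels = 1
--     sample_rate = 16000
--     if ";" in content_type:
--         for part in content_type.split(";"):
--             token = part.strip()
--             if token.startswith("channels="):
--                 try:
--                     channels = max(1, int(token.split("=", 1)[1]))
--                 except Exception:
--                     pass
--             elif token.startswith("rate="):
--                 try:
--                     sample_rate = max(8000, int(token.split("=", 1)[1]))
--                 except Exception: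
--                     pass
--     return channels, sample_rate
-- ===== SOURCE B (Python) =====
-- def _last_parsed(tokens, prefix):
--     # last token with this prefix whose value parses as int, scanned back-to-front
--     for t in reversed(tokens):
--         if t.startswith(prefix):
--             try:
--                 return int(t.split("=", 1)[1])
--             except Exception:
--                 continue
--     return None
--
--
-- def _parse_pcm_format(content_type: str) -> tuple[int, int]:
--     if ";" not in content_type:
--         return 1, 16000
--     tokens = [part.strip() for part in content_type.split(";")]
--     c = _last_parsed(tokens, "channels=")
--     r = _last_parsed(tokens, "rate=")
--     return (max(1, c) if c is not None else 1,
--             max(8000, r) if r is not None else 16000)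
-- ===== Notes on version B (the rewrite author's own statement) =====
-- stated objective: alternative
-- what changed: A's single stateful loop that overwrites (channels, rate) in place is replaced by two independent back-to-front searches over the stripped tokens, each returning the last token with the given key whose value parses as an int.
import Mathlib
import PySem

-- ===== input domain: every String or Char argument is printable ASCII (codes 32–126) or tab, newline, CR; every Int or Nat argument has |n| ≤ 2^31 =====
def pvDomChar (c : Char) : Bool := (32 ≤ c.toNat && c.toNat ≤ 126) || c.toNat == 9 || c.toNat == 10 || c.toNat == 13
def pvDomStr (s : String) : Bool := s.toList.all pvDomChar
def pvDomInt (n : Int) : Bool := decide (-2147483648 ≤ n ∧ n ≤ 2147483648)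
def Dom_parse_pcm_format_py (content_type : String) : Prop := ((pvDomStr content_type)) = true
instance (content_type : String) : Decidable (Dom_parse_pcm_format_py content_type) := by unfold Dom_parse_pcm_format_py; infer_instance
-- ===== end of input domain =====

-- B replaces A's single stateful overwrite loop by two independent back-to-front
-- searches (first parseable "channels="/"rate=" token from the end); objective: alternative.

-- shared value extraction: token.split("=", 1)[1] ([1] exists whenever the token
-- has a "key=" prefix; the .getD "" only totalizes the impossible case)
def pvTokVal (token : String) : String :=
  (PySem.List.pyGet? ((PySem.Str.splitMax? token "=" 1).getD []) 1).getD ""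

-- ===== PORT A =====
def pvStepA (st : Int × Int) (part : String) : Int × Int :=
  let token := PySem.Str.strip part
  if PySem.Str.startswith token "channels=" then
    match PySem.Int.ofStr? (pvTokVal token) with
    | some n => (max 1 n, st.2)
    | none => st
  else if PySem.Str.startswith token "rate=" then
    match PySem.Int.ofStr? (pvTokVal token) with
    | some n => (st.1, max 8000 n)
    | none => st
  else st

def parse_pcm_format_py (content_type : String) : Int × Int :=
  if PySem.Str.isIn ";" content_type then
    ((PySem.Str.split? content_type ";").getD []).foldl pvStepA (1, 16000)
  else (1, 16000)

-- ===== PORT B =====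
def pvLastParsed (tokens : List String) (pfx : String) : Option Int :=
  tokens.reverse.findSome? (fun t =>
    if PySem.Str.startswith t pfx then PySem.Int.ofStr? (pvTokVal t) else none)

def parse_pcm_format_py_alt (content_type : String) : Int × Int :=
  if PySem.Str.isIn ";" content_type then
    let tokens := ((PySem.Str.split? content_type ";").getD []).map PySem.Str.strip
    let c := pvLastParsed tokens "channels="
    let r := pvLastParsed tokens "rate="
    ((c.map (fun n => max 1 n)).getD 1, (r.map (fun n => max 8000 n)).getD 16000)
  else (1, 16000)

-- ===== PRECONDITION & SPEC =====
def Spec_parse_pcm_format_py (content_type : String) (out : Int × Int) : Prop := out = parse_pcm_format_py_alt content_type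
instance (content_type : String) (out : Int × Int) : Decidable (Spec_parse_pcm_format_py content_type out) := by unfold Spec_parse_pcm_format_py; infer_instance

-- ===== CLAIM (what is proved, stated in full; the proofs are below) =====
def Claim_equal_parse_pcm_format_py : Prop := ∀ (content_type : String), Dom_parse_pcm_format_py content_type → Spec_parse_pcm_format_py content_type (parse_pcm_format_py content_type)

-- ===== LEMMAS AND PROOFS =====

-- the per-prefix selector used by B
def pvSel (pfx : String) (t : String) : Option Int :=
  if PySem.Str.startswith t pfx then PySem.Int.ofStr? (pvTokVal t) else none

theorem pv_findSome?_singleton {α β : Type} (f : α → Option β) (x : α) :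
    List.findSome? f [x] = f x := by
  cases h : f x <;> simp [List.findSome?, h]

-- a token cannot start with both "channels=" and "rate="
theorem pv_not_both (t : String)
    (h1 : PySem.Str.startswith t "channels=" = true)
    (h2 : PySem.Str.startswith t "rate=" = true) : False := by
  rw [PySem.Str.startswith_eq] at h1 h2
  rw [PySem.Chars.startswith_iff] at h1 h2
  rcases List.prefix_or_prefix_of_prefix h1 h2 with h | h <;>
    · obtain ⟨t, ht⟩ := h
      simp at ht

-- A's step, phrased through B's selector
theorem pvStepA_eq (st : Int × Int) (p : String) :
    pvStepA st p =
      ((pvSel "channels=" (PySem.Str.strip p)).elim st.1 (fun n => max 1 n),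
       (pvSel "rate=" (PySem.Str.strip p)).elim st.2 (fun n => max 8000 n)) := by
  cases hch : PySem.Str.startswith (PySem.Str.strip p) "channels="
  · cases hrt : PySem.Str.startswith (PySem.Str.strip p) "rate="
    · simp only [pvStepA, pvSel, hch, hrt]
      simp
    · simp only [pvStepA, pvSel, hch, hrt]
      cases PySem.Int.ofStr? (pvTokVal (PySem.Str.strip p)) <;> simp
  · have hrt : PySem.Str.startswith (PySem.Str.strip p) "rate=" = false := by
      by_contra h
      exact pv_not_both _ hch
        (by revert h; cases PySem.Str.startswith (PySem.Str.strip p) "rate=" <;> simp)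
    simp only [pvStepA, pvSel, hch, hrt]
    cases PySem.Int.ofStr? (pvTokVal (PySem.Str.strip p)) <;> simp

-- the main invariant: folding A's step equals the two independent reverse searches
theorem pv_fold_eq (parts : List String) (c r : Int) :
    parts.foldl pvStepA (c, r) =
      ((((parts.map PySem.Str.strip).reverse.findSome? (pvSel "channels=")).map
          (fun n => max 1 n)).getD c,
       (((parts.map PySem.Str.strip).reverse.findSome? (pvSel "rate=")).map
          (fun n => max 8000 n)).getD r) := by
  induction parts generalizing c r with
  | nil => simp
  | cons p ps ih =>
    have hrev : ((p :: ps).map PySem.Str.strip).reverse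
        = (ps.map PySem.Str.strip).reverse ++ [PySem.Str.strip p] := by simp
    rw [List.foldl_cons, pvStepA_eq, ih, hrev, List.findSome?_append, List.findSome?_append,
      pv_findSome?_singleton, pv_findSome?_singleton]
    cases hC : pvSel "channels=" (PySem.Str.strip p) <;>
      cases hR : pvSel "rate=" (PySem.Str.strip p) <;>
      cases hOC : (ps.map PySem.Str.strip).reverse.findSome? (pvSel "channels=") <;>
      cases hOR : (ps.map PySem.Str.strip).reverse.findSome? (pvSel "rate=") <;>
      simp

-- ===== VERDICT (by name: the statement is the Claim_ definition above) =====
theorem parse_pcm_format_py_spec : Claim_equal_parse_pcm_format_py := by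
  intro content_type _
  unfold Spec_parse_pcm_format_py parse_pcm_format_py parse_pcm_format_py_alt
  by_cases h : PySem.Str.isIn ";" content_type = true
  · simp only [h, if_true]
    rw [pv_fold_eq]
    rfl
  · rw [if_neg h, if_neg h]
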